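-- pv_equiv track=rewrite | github.com/unexcellent/tablix | tablix/renderers/latex.py | _construct_hline_or_clines
-- ===== SOURCE A (Python) =====
-- def _construct_hline_or_clines(
--     r: int, num_cols: int, merge_spans: dict[tuple[int, int], int]
-- ) -> str:
--     if all(merge_spans[(r, c)] != 0 for c in range(num_cols)):
--         return "\\hline"
--
--     clines: list[str] = []
--     start: int | None = None
--     for c in range(num_cols):
--         if merge_spans[(r, c)] != 0:
--             if start is None:
--                 start = c + 1
--         elif start is not None:
--             clines.append(f"\\cline{{{start}-{c}}}")
--             start = None
--
--     if start is not None: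
--         clines.append(f"\\cline{{{start}-{num_cols}}}")
--
--     return " ".join(clines)
-- ===== SOURCE B (Python) =====
-- def _construct_hline_or_clines(r, num_cols, merge_spans):
--     seps = [c for c in range(num_cols) if merge_spans[(r, c)] == 0]
--     if not seps:
--         return "\\hline"
--     bounds = [-1] + seps + [num_cols]
--     return " ".join(
--         f"\\cline{{{lo + 2}-{hi}}}"
--         for lo, hi in zip(bounds, bounds[1:])
--         if hi - lo > 1
--     )
-- ===== Notes on version B (the rewrite author's own statement) =====
-- stated objective: idiomatic
-- what changed: Replaces A's running start/None state machine over the columns by a separator/complement view: collect the zero columns, add boundary separators -1 and num_cols, and emit one \cline per gap wider than zero between consecutive separators.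
import Mathlib
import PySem

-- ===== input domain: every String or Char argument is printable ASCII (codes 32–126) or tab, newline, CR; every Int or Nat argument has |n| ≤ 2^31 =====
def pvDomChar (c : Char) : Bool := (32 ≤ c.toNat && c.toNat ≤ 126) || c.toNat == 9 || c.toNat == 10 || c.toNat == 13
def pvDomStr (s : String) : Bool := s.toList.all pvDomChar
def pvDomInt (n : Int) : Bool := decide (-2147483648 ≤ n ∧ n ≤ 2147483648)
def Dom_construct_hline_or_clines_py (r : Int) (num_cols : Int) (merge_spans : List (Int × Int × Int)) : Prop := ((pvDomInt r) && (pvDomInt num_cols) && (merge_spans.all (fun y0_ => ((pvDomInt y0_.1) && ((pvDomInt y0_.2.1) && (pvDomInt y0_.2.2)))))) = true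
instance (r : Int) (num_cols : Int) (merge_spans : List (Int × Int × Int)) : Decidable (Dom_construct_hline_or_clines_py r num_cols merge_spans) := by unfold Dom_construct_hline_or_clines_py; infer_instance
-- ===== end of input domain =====

-- B replaces A's running start/None state machine by a separator/gap view (collect zero
-- columns plus boundaries -1 and num_cols, emit one \cline per gap wider than zero); same
-- cost, more declarative (objective: idiomatic).

-- ===== PORT A =====
-- shared dict lookup: merge_spans[(r, c)] (first match; default 0 is only reached
-- outside Pre_, where the Python raises KeyError)
def pvLookup (ms : List (Int × Int × Int)) (r c : Int) : Option Int :=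
  match ms with
  | [] => none
  | (r', c', v) :: rest => if r' = r ∧ c' = c then some v else pvLookup rest r c

def pvGet (ms : List (Int × Int × Int)) (r c : Int) : Int := (pvLookup ms r c).getD 0

-- f"\\cline{{{a}-{b}}}"
def pvCline (a b : Int) : String :=
  "\\cline{" ++ PySem.Int.toStr a ++ "-" ++ PySem.Int.toStr b ++ "}"

-- loop body of A's for-loop (state: (clines, start))
def pvStepA (g : Int → Int) (acc : List String × Option Int) (c : Int) :
    List String × Option Int :=
  if g c ≠ 0 then
    match acc.2 with
    | none => (acc.1, some (c + 1))
    | some _ => acc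
  else
    match acc.2 with
    | some s => (acc.1 ++ [pvCline s c], none)
    | none => acc

def construct_hline_or_clines_py (r : Int) (num_cols : Int) (merge_spans : List (Int × Int × Int)) : String :=
  if (PySem.List.pyRange 0 num_cols 1).all (fun c => pvGet merge_spans r c != 0) then
    "\\hline"
  else
    let st := (PySem.List.pyRange 0 num_cols 1).foldl (pvStepA (pvGet merge_spans r)) ([], none)
    let clines :=
      match st.2 with
      | some s => st.1 ++ [pvCline s num_cols]
      | none => st.1
    PySem.Str.join " " clines

-- ===== PORT B =====
def construct_hline_or_clines_py_alt (r : Int) (num_cols : Int) (merge_spans : List (Int × Int × Int)) : String :=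
  let seps := (PySem.List.pyRange 0 num_cols 1).filter (fun c => pvGet merge_spans r c == 0)
  if seps.isEmpty then
    "\\hline"
  else
    let bounds := ((-1 : Int) :: seps) ++ [num_cols]
    PySem.Str.join " "
      ((bounds.zip bounds.tail).filterMap
        (fun p => if p.2 - p.1 > 1 then some (pvCline (p.1 + 2) p.2) else none))

-- ===== PRECONDITION & SPEC =====
-- Pre_ excludes exactly the inputs on which Python A raises KeyError: some column
-- c in range(num_cols) has no entry (r, c) in merge_spans.
-- (the leading size test num_cols ≤ length is implied by the coverage condition — distinct
-- columns need distinct entries — and only short-circuits it, so deciding Pre_ never scans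
-- a range larger than the association list)
def Pre_construct_hline_or_clines_py (r : Int) (num_cols : Int) (merge_spans : List (Int × Int × Int)) : Prop :=
  if num_cols ≤ (merge_spans.length : Int) then
    ∀ c ∈ PySem.List.pyRange 0 num_cols 1, ∃ e ∈ merge_spans, e.1 = r ∧ e.2.1 = c
  else False
instance (r : Int) (num_cols : Int) (merge_spans : List (Int × Int × Int)) : Decidable (Pre_construct_hline_or_clines_py r num_cols merge_spans) := by unfold Pre_construct_hline_or_clines_py; infer_instance

def pvWitness_construct_hline_or_clines_py : Int × Int × (List (Int × Int × Int)) :=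
  (0, 3, [(0, 0, 1), (0, 1, 0), (0, 2, 2)])

def Spec_construct_hline_or_clines_py (r : Int) (num_cols : Int) (merge_spans : List (Int × Int × Int)) (out : String) : Prop := out = construct_hline_or_clines_py_alt r num_cols merge_spans
instance (r : Int) (num_cols : Int) (merge_spans : List (Int × Int × Int)) (out : String) : Decidable (Spec_construct_hline_or_clines_py r num_cols merge_spans out) := by unfold Spec_construct_hline_or_clines_py; infer_instance

-- ===== CLAIM (what is proved, stated in full; the proofs are below) =====
def Claim_equal_construct_hline_or_clines_py : Prop := ∀ (r : Int) (num_cols : Int) (merge_spans : List (Int × Int × Int)), Dom_construct_hline_or_clines_py r num_cols merge_spans → Pre_construct_hline_or_clines_py r num_cols merge_spans → Spec_construct_hline_or_clines_py r num_cols merge_spans (construct_hline_or_clines_py r num_cols merge_spans)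

-- ===== LEMMAS AND PROOFS =====

-- the \cline strings generated by consecutive pairs of a separator list
def pvParts : List Int → List String
  | a :: b :: rest => (if b - a > 1 then [pvCline (a + 2) b] else []) ++ pvParts (b :: rest)
  | _ => []

lemma pvGetLastD_concat (l : List Int) (x d : Int) : (l ++ [x]).getLastD d = x := by
  induction l generalizing d with
  | nil => rfl
  | cons b l ih => rw [List.cons_append, List.getLastD_cons, ih]

lemma pvZip_eq_parts : ∀ l : List Int,
    (l.zip l.tail).filterMap
      (fun p => if p.2 - p.1 > 1 then some (pvCline (p.1 + 2) p.2) else none) = pvParts l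
  | [] => by simp [pvParts]
  | [a] => by simp [pvParts]
  | a :: b :: rest => by
      have ih := pvZip_eq_parts (b :: rest)
      simp only [List.tail_cons, List.zip_cons_cons, List.filterMap_cons] at *
      rw [ih]
      split_ifs with h <;> simp [pvParts, h]

lemma pvParts_snoc : ∀ (l : List Int) (a x : Int),
    pvParts (a :: (l ++ [x]))
      = pvParts (a :: l)
        ++ (if x - l.getLastD a > 1 then [pvCline (l.getLastD a + 2) x] else [])
  | [], a, x => by simp [pvParts]
  | b :: l', a, x => by
      have ih := pvParts_snoc l' b x
      simp only [List.cons_append, pvParts] at *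
      rw [ih, List.getLastD_cons, List.append_assoc]

lemma pvInv (g : Int → Int) (n : Nat) :
    ((PySem.List.pyRange 0 (n : Int) 1).filter (fun c => g c == 0)).getLastD (-1) < (n : Int) ∧
    (PySem.List.pyRange 0 (n : Int) 1).foldl (pvStepA g) ([], none)
      = (pvParts ((-1) :: (PySem.List.pyRange 0 (n : Int) 1).filter (fun c => g c == 0)),
         if ((PySem.List.pyRange 0 (n : Int) 1).filter (fun c => g c == 0)).getLastD (-1) = (n : Int) - 1
         then none
         else some (((PySem.List.pyRange 0 (n : Int) 1).filter (fun c => g c == 0)).getLastD (-1) + 2)) := by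
  induction n with
  | zero =>
      rw [PySem.List.pyRange_one_eq_nil (by norm_num)]
      refine ⟨by norm_num, ?_⟩
      rw [List.filter_nil, List.foldl_nil, if_pos (by norm_num)]
      rfl
  | succ n ih =>
      obtain ⟨hlt, hfold⟩ := ih
      have hc : ((n + 1 : Nat) : Int) = (n : Int) + 1 := by push_cast; ring
      have hsplit : PySem.List.pyRange 0 ((n : Int) + 1) 1
          = PySem.List.pyRange 0 (n : Int) 1 ++ [(n : Int)] :=
        PySem.List.pyRange_one_succ_right (by positivity)
      rw [hc, hsplit, List.filter_append, List.foldl_append, hfold]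
      by_cases hg : g (n : Int) = 0
      · have hf : List.filter (fun c => g c == 0) [(n : Int)] = [(n : Int)] := by simp [hg]
        rw [hf, pvGetLastD_concat]
        refine ⟨by omega, ?_⟩
        rw [if_pos (show (n : Int) = (n : Int) + 1 - 1 by ring)]
        by_cases hl : ((PySem.List.pyRange 0 (n : Int) 1).filter (fun c => g c == 0)).getLastD (-1) = (n : Int) - 1
        · rw [if_pos hl]
          simp only [List.foldl_cons, List.foldl_nil, pvStepA, if_neg (not_not_intro hg)]
          rw [show ((-1 : Int) :: (List.filter (fun c => g c == 0) (PySem.List.pyRange 0 (n : Int) 1) ++ [(n : Int)]))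
                = (-1 : Int) :: (List.filter (fun c => g c == 0) (PySem.List.pyRange 0 (n : Int) 1) ++ [(n : Int)]) from rfl,
              pvParts_snoc, hl, if_neg (show ¬((n : Int) - ((n : Int) - 1) > 1) by omega)]
          rw [List.append_nil]
        · rw [if_neg hl]
          simp only [List.foldl_cons, List.foldl_nil, pvStepA, if_neg (not_not_intro hg)]
          rw [pvParts_snoc,
              if_pos (show (n : Int) - (List.filter (fun c => g c == 0) (PySem.List.pyRange 0 (n : Int) 1)).getLastD (-1) > 1 by omega)]
      · have hf : List.filter (fun c => g c == 0) [(n : Int)] = [] := by simp [hg]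
        rw [hf, List.append_nil]
        refine ⟨by omega, ?_⟩
        by_cases hl : ((PySem.List.pyRange 0 (n : Int) 1).filter (fun c => g c == 0)).getLastD (-1) = (n : Int) - 1
        · rw [if_pos hl]
          simp only [List.foldl_cons, List.foldl_nil, pvStepA, if_pos hg]
          rw [if_neg (show ¬((List.filter (fun c => g c == 0) (PySem.List.pyRange 0 (n : Int) 1)).getLastD (-1) = (n : Int) + 1 - 1) by omega), hl]
          simp only [Prod.mk.injEq, Option.some.injEq]
          exact ⟨trivial, by omega⟩
        · rw [if_neg hl]
          simp only [List.foldl_cons, List.foldl_nil, pvStepA, if_pos hg]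
          rw [if_neg (show ¬((List.filter (fun c => g c == 0) (PySem.List.pyRange 0 (n : Int) 1)).getLastD (-1) = (n : Int) + 1 - 1) by omega)]

-- ===== VERDICT (by name: the statement is the Claim_ definition above) =====
theorem construct_hline_or_clines_py_spec : Claim_equal_construct_hline_or_clines_py := by
  intro r num_cols merge_spans _ _
  unfold Spec_construct_hline_or_clines_py
  unfold construct_hline_or_clines_py construct_hline_or_clines_py_alt
  by_cases hn : num_cols ≤ 0
  · rw [PySem.List.pyRange_one_eq_nil hn]
    simp
  · obtain ⟨n, hc⟩ : ∃ n : Nat, (n : Int) = num_cols :=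
      ⟨num_cols.toNat, Int.toNat_of_nonneg (by omega)⟩
    subst hc
    obtain ⟨hlt, hfold⟩ := pvInv (pvGet merge_spans r) n
    set L := (PySem.List.pyRange 0 (n : Int) 1).filter (fun c => pvGet merge_spans r c == 0) with hL
    have hall : ((PySem.List.pyRange 0 (n : Int) 1).all (fun c => pvGet merge_spans r c != 0))
        = L.isEmpty := by
      rcases h : L.isEmpty with _ | _
      · rw [List.isEmpty_eq_false_iff_exists_mem] at h
        obtain ⟨x, hx⟩ := h
        rw [hL, List.mem_filter] at hx
        rw [List.all_eq_false]
        exact ⟨x, hx.1, by simp_all⟩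
      · rw [List.isEmpty_iff] at h
        simp only [List.all_eq_true]
        intro x hx
        have : x ∉ L := by rw [h]; exact List.not_mem_nil
        rw [hL, List.mem_filter] at this
        simp_all
    rw [hall, hfold]
    by_cases he : L.isEmpty = true
    · rw [if_pos he, if_pos he]
    · rw [if_neg he, if_neg he]
      simp only [pvZip_eq_parts, List.cons_append]
      rw [pvParts_snoc]
      by_cases hl : L.getLastD (-1) = (n : Int) - 1
      · rw [if_pos hl, hl, if_neg (show ¬((n : Int) - ((n : Int) - 1) > 1) by omega), List.append_nil]
      · rw [if_neg hl, if_pos (show (n : Int) - L.getLastD (-1) > 1 by omega)]
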